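-- pv_equiv track=rewrite | github.com/minh-liem/rosalind | py/sseq.py | greedy_subseq_indeces
-- ===== SOURCE A (Python) =====
-- def greedy_subseq_indeces(str1, str2):
--     indices = []
--
--     for nuc2 in str2:
--
--         current_nuc1_pos = 1
--         for nuc1 in str1:
--             if nuc1 == nuc2:
--                 if len(indices) == 0:
--                     indices.append(current_nuc1_pos)
--                     break
--                 elif current_nuc1_pos > indices[-1]:
--                     indices.append(current_nuc1_pos)
--                     break
--             current_nuc1_pos += 1
--
--
--     return indices
-- ===== SOURCE B (Python) =====
-- def greedy_subseq_indeces(str1, str2):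
--     indices = []
--     pos = 0
--     for c in str2:
--         i = str1.find(c, pos)
--         if i != -1:
--             pos = i + 1
--             indices.append(pos)
--     return indices
-- ===== Notes on version B (the rewrite author's own statement) =====
-- stated objective: faster
-- what changed: B keeps a running position and searches only the suffix str1[pos:] with one str.find per character of str2, instead of A's full rescan of str1 from the start (with an index counter and a last-index comparison) for every character of str2.
import Mathlib
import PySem

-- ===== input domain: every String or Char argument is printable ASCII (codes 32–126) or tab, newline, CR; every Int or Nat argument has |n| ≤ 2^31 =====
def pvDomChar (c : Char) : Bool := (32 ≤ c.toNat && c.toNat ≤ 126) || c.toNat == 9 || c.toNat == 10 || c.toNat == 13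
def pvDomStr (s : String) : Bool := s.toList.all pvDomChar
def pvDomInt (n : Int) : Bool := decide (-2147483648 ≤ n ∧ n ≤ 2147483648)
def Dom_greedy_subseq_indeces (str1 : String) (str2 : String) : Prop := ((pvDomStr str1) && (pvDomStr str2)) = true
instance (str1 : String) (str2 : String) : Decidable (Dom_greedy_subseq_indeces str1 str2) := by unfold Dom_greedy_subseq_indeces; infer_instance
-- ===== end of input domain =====

-- B scans only the suffix str1[pos:] (one find per character of str2) instead of A's full
-- rescan of str1 with a counter for every character; objective: faster (constant-factor).

-- ===== PORT A =====
-- inner `for nuc1 in str1` loop of A, with break encoded as returning the new list;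
-- `indices[-1]` is guarded by the len == 0 check, so getLastD 0 is exact for it there.
def pvGoA (nuc2 : Char) : List Char → Int → List Int → List Int
  | [], _, indices => indices
  | nuc1 :: rest, current_nuc1_pos, indices =>
    if nuc1 = nuc2 then
      if indices.length = 0 then indices ++ [current_nuc1_pos]
      else if current_nuc1_pos > indices.getLastD 0 then indices ++ [current_nuc1_pos]
      else pvGoA nuc2 rest (current_nuc1_pos + 1) indices
    else pvGoA nuc2 rest (current_nuc1_pos + 1) indices

def greedy_subseq_indeces (str1 : String) (str2 : String) : List Int :=
  str2.toList.foldl (fun indices nuc2 => pvGoA nuc2 str1.toList 1 indices) []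

-- ===== PORT B =====
-- str1.find(c, pos): Python's find with a start index; exact here since pos ≥ 0 always.
def pvFindFrom (l : List Char) (c : Char) (start : Nat) : Int :=
  match (l.drop start).findIdx? (· = c) with
  | some j => ((start : Int) + j)
  | none => -1

-- body of B's single `for c in str2` loop: state = (indices, pos)
def pvStepB (l1 : List Char) (st : List Int × Nat) (c : Char) : List Int × Nat :=
  let i := pvFindFrom l1 c st.2
  if i ≠ -1 then (st.1 ++ [i + 1], (i + 1).toNat) else st

def greedy_subseq_indeces_alt (str1 : String) (str2 : String) : List Int :=
  (str2.toList.foldl (pvStepB str1.toList) ([], 0)).1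

-- ===== PRECONDITION & SPEC =====
def Spec_greedy_subseq_indeces (str1 : String) (str2 : String) (out : List Int) : Prop := out = greedy_subseq_indeces_alt str1 str2
instance (str1 : String) (str2 : String) (out : List Int) : Decidable (Spec_greedy_subseq_indeces str1 str2 out) := by unfold Spec_greedy_subseq_indeces; infer_instance

-- ===== CLAIM (what is proved, stated in full; the proofs are below) =====
def Claim_equal_greedy_subseq_indeces : Prop := ∀ (str1 : String) (str2 : String), Dom_greedy_subseq_indeces str1 str2 → Spec_greedy_subseq_indeces str1 str2 (greedy_subseq_indeces str1 str2)

-- ===== LEMMAS AND PROOFS =====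

-- first 1-based position p ≥ k (scanning l) beyond threshold t whose char equals c
def pvFirstHit (c : Char) : List Char → Int → Int → Option Int
  | [], _, _ => none
  | x :: xs, k, t => if x = c ∧ t < k then some k else pvFirstHit c xs (k + 1) t

-- A's inner loop appends the first hit beyond the last index (0 if indices is empty)
theorem pvGoA_eq (c : Char) : ∀ (l : List Char) (k : Int) (ind : List Int), 1 ≤ k →
    pvGoA c l k ind =
      (match pvFirstHit c l k (if ind = [] then 0 else ind.getLastD 0) with
        | none => ind
        | some p => ind ++ [p]) := by
  intro l
  induction l with
  | nil => intro k ind _; simp [pvGoA, pvFirstHit]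
  | cons x xs ih =>
    intro k ind hk
    by_cases hx : x = c
    · cases ind with
      | nil =>
        have h0 : (0 : Int) < k := by omega
        simp [pvGoA, pvFirstHit, hx, h0]
      | cons a as =>
        have hne : (a :: as : List Int) ≠ [] := by simp
        have eA : pvGoA c (x :: xs) k (a :: as) =
            if k > (a :: as).getLastD 0 then (a :: as) ++ [k]
            else pvGoA c xs (k + 1) (a :: as) := by
          simp [pvGoA, hx]
        have eF : pvFirstHit c (x :: xs) k ((a :: as).getLastD 0) =
            if (a :: as).getLastD 0 < k then some k
            else pvFirstHit c xs (k + 1) ((a :: as).getLastD 0) := by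
          simp [pvFirstHit, hx]
        rw [eA, if_neg hne, eF]
        by_cases hgt : (a :: as).getLastD 0 < k
        · rw [if_pos hgt, if_pos (by omega : k > (a :: as).getLastD 0)]
        · rw [if_neg hgt, if_neg (by omega : ¬ k > (a :: as).getLastD 0)]
          rw [ih (k + 1) (a :: as) (by omega), if_neg hne]
    · have hc1 : ¬ (x = c ∧ (if ind = [] then (0:Int) else ind.getLastD 0) < k) :=
        fun hp => hx hp.1
      simp only [pvGoA, pvFirstHit, if_neg hx, if_neg hc1]
      rw [ih (k + 1) ind (by omega)]

-- positions k..k+m-1 are all ≤ t, so the first m elements can be dropped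
theorem pvFirstHit_skip (c : Char) : ∀ (m : Nat) (l : List Char) (k t : Int),
    k + m ≤ t + 1 → pvFirstHit c l k t = pvFirstHit c (l.drop m) (k + m) t := by
  intro m
  induction m with
  | zero => intro l k t _; simp
  | succ n ih =>
    intro l k t h
    cases l with
    | nil => simp [pvFirstHit]
    | cons x xs =>
      have hc : ¬ (x = c ∧ t < k) := by intro hp; omega
      simp only [pvFirstHit, if_neg hc, List.drop_succ_cons]
      rw [ih xs (k + 1) t (by omega)]
      congr 1
      push_cast
      ring

-- beyond the threshold, the first hit is just the first occurrence of c
theorem pvFirstHit_found (c : Char) : ∀ (l : List Char) (k t : Int), t < k →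
    pvFirstHit c l k t =
      (match l.findIdx? (· = c) with
        | some j => some (k + j)
        | none => none) := by
  intro l
  induction l with
  | nil => intro k t _; simp [pvFirstHit, List.findIdx?_nil]
  | cons x xs ih =>
    intro k t ht
    by_cases hx : x = c
    · simp [pvFirstHit, hx, ht, List.findIdx?_cons]
    · have hc : ¬ (x = c ∧ t < k) := fun hp => hx hp.1
      simp only [pvFirstHit, if_neg hc, List.findIdx?_cons, decide_eq_true_eq, if_neg hx]
      rw [ih (k + 1) t (by omega)]
      cases h : xs.findIdx? (· = c) with
      | none => simp
      | some j =>
        simp only [Option.map_some]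
        congr 1
        push_cast
        ring

theorem pvGetLastD_concat : ∀ (l : List Int) (a d : Int), (l ++ [a]).getLastD d = a
  | [], _, _ => rfl
  | x :: xs, a, d => by
    rw [List.cons_append, List.getLastD_cons]
    exact pvGetLastD_concat xs a x

-- main invariant: A's running list equals B's, and B's pos is A's last index (0 if none)
theorem pv_main (l1 : List Char) : ∀ (l2 : List Char) (ind : List Int) (pos : Nat),
    (if ind = [] then (0:Int) else ind.getLastD 0) = (pos : Int) →
    l2.foldl (fun indices nuc2 => pvGoA nuc2 l1 1 indices) ind =
      (l2.foldl (pvStepB l1) (ind, pos)).1 := by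
  intro l2
  induction l2 with
  | nil => intro ind pos _; simp
  | cons c cs ih =>
    intro ind pos hinv
    rw [List.foldl_cons, List.foldl_cons]
    rw [pvGoA_eq c l1 1 ind (by omega), hinv]
    rw [pvFirstHit_skip c pos l1 1 (pos : Int) (by omega)]
    rw [pvFirstHit_found c (l1.drop pos) (1 + pos) (pos : Int) (by omega)]
    cases h : (l1.drop pos).findIdx? (· = c) with
    | none =>
      have hB : pvStepB l1 (ind, pos) c = (ind, pos) := by
        simp [pvStepB, pvFindFrom, h]
      rw [hB]
      exact ih ind pos hinv
    | some j =>
      have hne : ((pos : Int) + j ≠ -1) := by omega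
      have hB : pvStepB l1 (ind, pos) c = (ind ++ [(pos : Int) + j + 1], pos + j + 1) := by
        simp only [pvStepB, pvFindFrom, h, ne_eq, hne, not_false_eq_true, if_true,
          Prod.mk.injEq]
        refine ⟨trivial, ?_⟩
        omega
      rw [hB]
      have harg : (1 : Int) + pos + j = (pos : Int) + j + 1 := by ring
      show List.foldl (fun indices nuc2 => pvGoA nuc2 l1 1 indices)
          (ind ++ [(1 : Int) + pos + j]) cs = _
      rw [harg]
      apply ih
      have hne2 : ind ++ [(pos : Int) + j + 1] ≠ [] := by simp
      rw [if_neg hne2, pvGetLastD_concat]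
      push_cast
      ring

-- ===== VERDICT (by name: the statement is the Claim_ definition above) =====
theorem greedy_subseq_indeces_spec : Claim_equal_greedy_subseq_indeces := by
  intro str1 str2 _
  unfold Spec_greedy_subseq_indeces greedy_subseq_indeces greedy_subseq_indeces_alt
  exact pv_main str1.toList str2.toList [] 0 (by simp)
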